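-- pv_equiv track=rewrite | github.com/VIAME/VIAME | plugins/core/stabilize_many_images.py | combine_matches
-- ===== SOURCE A (Python) =====
-- import itertools
--
-- def combine_matches(match_sets):
--     """Given an iterable of iterables of pairs, return a list of lists
--     corresponding to "match chains".  (XXX improve wording)
--
--     """
--     DEFAULT = None
--     curr, result = {}, []
--     for i, matches in enumerate(itertools.chain(match_sets, [[]])):
--         curr, old = {}, curr
--         for x, y in matches:
--             try:
--                 chain = old.pop(x)
--             except KeyError:
--                 chain = i * [DEFAULT]
--                 chain.append(x)
--             chain.append(y)
--             curr[y] = chain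
--         for chain in result:
--             chain.append(DEFAULT)
--         result += old.values()
--     return result
-- ===== SOURCE B (Python) =====
-- def _walk(layers, j, v):
--     """Reconstruct the chain ending with value v at layer index j by
--     following the recorded backward links; returns (start_index, values)."""
--     x, cont = layers[j][v]
--     if cont and j > 0:
--         start, vals = _walk(layers, j - 1, x)
--         return start, vals + [v]
--     return j, [x, v]
--
--
-- def combine_matches(match_sets):
--     """Given an iterable of iterables of pairs, return a list of lists
--     corresponding to "match chains"."""
--     match_sets = list(match_sets)
--     n = len(match_sets)
--     # Pass 1: per layer, record for each endpoint y its predecessor x and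
--     # whether it continues a chain from the previous layer; also record
--     # which previous endpoints were consumed.
--     layers = []          # layers[i]: dict y -> (x, continued)
--     consumed_flags = []  # consumed_flags[i]: endpoints of layer i-1 consumed at layer i
--     prev_keys = set()
--     for matches in match_sets:
--         consumed = set()
--         table = {}
--         for x, y in matches:
--             cont = x in prev_keys and x not in consumed
--             if cont:
--                 consumed.add(x)
--             table[y] = (x, cont)
--         consumed_flags.append(consumed)
--         layers.append(table)
--         prev_keys = set(table)
--     consumed_flags.append(set())  # sentinel: nothing consumes the last layer
--     # Pass 2: every endpoint not consumed by the next layer ends a chain;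
--     # walk the links backwards and pad once to the uniform length n + 1.
--     L = n + 1
--     result = []
--     for i in range(n):
--         nxt = consumed_flags[i + 1]
--         for y in layers[i]:
--             if y not in nxt:
--                 start, vals = _walk(layers, i, y)
--                 result.append([None] * start + vals + [None] * (L - start - len(vals)))
--     return result
-- ===== Notes on version B (the rewrite author's own statement) =====
-- stated objective: alternative
-- what changed: B never builds or carries chain lists during the scan: a first pass only records, per layer, each endpoint's predecessor and a continuation flag plus which previous endpoints were consumed; a second pass finds the chain-terminating endpoints and reconstructs each output row by walking the recorded links backwards, padding once to the uniform length len(match_sets)+1, instead of A's dict of growing pre-padded chain lists with per-iteration None-padding of every finished chain.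
import Mathlib
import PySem

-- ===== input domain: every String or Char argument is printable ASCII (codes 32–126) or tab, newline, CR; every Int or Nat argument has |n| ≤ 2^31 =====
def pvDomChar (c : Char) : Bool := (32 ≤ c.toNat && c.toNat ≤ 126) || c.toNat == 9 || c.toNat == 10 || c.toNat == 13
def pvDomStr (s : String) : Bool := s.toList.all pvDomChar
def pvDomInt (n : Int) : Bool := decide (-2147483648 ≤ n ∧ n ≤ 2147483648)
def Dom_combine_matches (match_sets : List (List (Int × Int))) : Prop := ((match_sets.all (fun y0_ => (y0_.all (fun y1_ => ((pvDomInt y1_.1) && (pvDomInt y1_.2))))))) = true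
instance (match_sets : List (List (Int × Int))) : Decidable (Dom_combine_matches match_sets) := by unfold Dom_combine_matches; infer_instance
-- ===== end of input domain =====

-- B replaces A's dict of growing pre-padded chain lists (re-padded every iteration) by a
-- link-recording pass plus a backward chain-walking reconstruction pass (objective: alternative).

-- ===== PORT A =====
-- inner loop body: 'for x, y in matches: try chain = old.pop(x) except KeyError: chain = i*[None]; chain.append(x); chain.append(y); curr[y] = chain'
def pvStepInnerA (i : Nat) (co : PySem.Dict Int (List (Option Int)) × PySem.Dict Int (List (Option Int))) (xy : Int × Int) :
    PySem.Dict Int (List (Option Int)) × PySem.Dict Int (List (Option Int)) :=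
  match co.2.pop? xy.1 with
  | some (chain, old) => (co.1.insert xy.2 (chain ++ [some xy.2]), old)
  | none => (co.1.insert xy.2 ((List.replicate i (none : Option Int) ++ [some xy.1]) ++ [some xy.2]), co.2)

-- one iteration of 'for i, matches in enumerate(...)': inner loop, pad every result chain with None, flush old.values()
def pvStepA (st : Nat × PySem.Dict Int (List (Option Int)) × List (List (Option Int))) (ms_ : List (Int × Int)) :
    Nat × PySem.Dict Int (List (Option Int)) × List (List (Option Int)) :=
  let r := ms_.foldl (pvStepInnerA st.1) (PySem.Dict.mk [], st.2.1)
  (st.1 + 1, r.1, st.2.2.map (fun c => c ++ [(none : Option Int)]) ++ r.2.values)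

def combine_matches (match_sets : List (List (Int × Int))) : List (List (Option Int)) :=
  ((match_sets ++ [[]]).foldl pvStepA (0, PySem.Dict.mk [], [])).2.2

-- ===== PORT B =====
-- _walk: follow the recorded continuation links backwards; structural recursion on the layer index j
def pvWalk (layers : List (PySem.Dict Int (Int × Bool))) : Nat → Int → Nat × List Int
  | 0, v =>
    let xc := (layers.getD 0 (PySem.Dict.mk [])).getD v (0, false)
    (0, [xc.1, v])
  | j + 1, v =>
    let xc := (layers.getD (j + 1) (PySem.Dict.mk [])).getD v (0, false)
    if xc.2 then
      let sv := pvWalk layers j xc.1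
      (sv.1, sv.2 ++ [v])
    else (j + 1, [xc.1, v])

-- pass-1 inner loop body: 'cont = x in prev_keys and x not in consumed; if cont: consumed.add(x); table[y] = (x, cont)'
def pvStepInnerB (prev : PySem.Set Int) (st : PySem.Set Int × PySem.Dict Int (Int × Bool)) (xy : Int × Int) :
    PySem.Set Int × PySem.Dict Int (Int × Bool) :=
  let cont := prev.contains xy.1 && !(st.1.contains xy.1)
  ((if cont then st.1.add xy.1 else st.1), st.2.insert xy.2 (xy.1, cont))

-- one iteration of pass 1: build this layer's table and consumed set, append both, reset prev_keys
def pvStepB (st : List (PySem.Dict Int (Int × Bool)) × List (PySem.Set Int) × PySem.Set Int) (ms_ : List (Int × Int)) :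
    List (PySem.Dict Int (Int × Bool)) × List (PySem.Set Int) × PySem.Set Int :=
  let r := ms_.foldl (pvStepInnerB st.2.2) (([] : PySem.Set Int), PySem.Dict.mk [])
  (st.1 ++ [r.2], st.2.1 ++ [r.1], PySem.Set.ofList r.2.keys)

-- '[None]*start + vals + [None]*(L - start - len(vals))'
def pvPadB (L : Nat) (sv : Nat × List Int) : List (Option Int) :=
  List.replicate sv.1 (none : Option Int) ++ sv.2.map some ++ List.replicate (L - sv.1 - sv.2.length) (none : Option Int)

def combine_matches_alt (match_sets : List (List (Int × Int))) : List (List (Option Int)) :=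
  let fin := match_sets.foldl pvStepB ([], [], ([] : PySem.Set Int))
  let layers := fin.1
  let flags := fin.2.1 ++ [([] : PySem.Set Int)]
  let L := match_sets.length + 1
  (List.range match_sets.length).foldl (fun acc i =>
    (layers.getD i (PySem.Dict.mk [])).keys.foldl (fun acc2 y =>
      if !((flags.getD (i + 1) ([] : PySem.Set Int)).contains y) then
        acc2 ++ [pvPadB L (pvWalk layers i y)]
      else acc2) acc) []

-- ===== PRECONDITION & SPEC =====
def Spec_combine_matches (match_sets : List (List (Int × Int))) (out : List (List (Option Int))) : Prop := out = combine_matches_alt match_sets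
instance (match_sets : List (List (Int × Int))) (out : List (List (Option Int))) : Decidable (Spec_combine_matches match_sets out) := by unfold Spec_combine_matches; infer_instance

-- ===== CLAIM (what is proved, stated in full; the proofs are below) =====
def Claim_equal_combine_matches : Prop := ∀ (match_sets : List (List (Int × Int))), Dom_combine_matches match_sets → Spec_combine_matches match_sets (combine_matches match_sets)

-- ===== LEMMAS AND PROOFS =====

-- A's chain for an unflushed chain ending at walk result (start, vals): start Nones then the values
def pvEmb (sv : Nat × List Int) : List (Option Int) :=
  List.replicate sv.1 (none : Option Int) ++ sv.2.map some

-- A's chain value for a table entry (y, (x, cont)) of layer k (layers = the k earlier tables)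
def pvVal (k : Nat) (layers : List (PySem.Dict Int (Int × Bool))) (p : Int × (Int × Bool)) : List (Option Int) :=
  if p.2.2 then pvEmb (pvWalk layers (k - 1) p.2.1) ++ [some p.1]
  else List.replicate k (none : Option Int) ++ [some p.2.1, some p.1]

-- the chains flushed so far, as walk results (flags.length = number of processed layers)
def pvFlushK (layers : List (PySem.Dict Int (Int × Bool))) (flags : List (PySem.Set Int)) : List (Nat × List Int) :=
  (List.range (flags.length - 1)).flatMap (fun i =>
    ((layers.getD i (PySem.Dict.mk [])).keys.filter
      (fun y => !((flags.getD (i + 1) ([] : PySem.Set Int)).contains y))).map (pvWalk layers i))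

-- A's curr dict is the table with every entry's chain value
def pvRelC (k : Nat) (layers : List (PySem.Dict Int (Int × Bool))) (dA : PySem.Dict Int (List (Option Int))) (t : PySem.Dict Int (Int × Bool)) : Prop :=
  dA.items = t.items.map (fun p => (p.1, pvVal k layers p))

-- A's old dict is the previous table minus the consumed keys, with embedded walk chains
def pvRelO (k : Nat) (layers : List (PySem.Dict Int (Int × Bool))) (dA : PySem.Dict Int (List (Option Int))) (prevT : PySem.Dict Int (Int × Bool)) (cons : PySem.Set Int) : Prop :=
  dA.items = (prevT.items.filter (fun p => !(cons.contains p.1))).map (fun p => (p.1, pvEmb (pvWalk layers (k - 1) p.1)))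

lemma pvWalk_len (layers : List (PySem.Dict Int (Int × Bool))) (j : Nat) (v : Int) :
    (pvWalk layers j v).1 + (pvWalk layers j v).2.length = j + 2 := by
  induction j generalizing v with
  | zero => simp [pvWalk]
  | succ j ih =>
    simp only [pvWalk]
    split
    · have := ih ((layers.getD (j + 1) (PySem.Dict.mk [])).getD v (0, false)).1
      simp only [List.length_append, List.length_cons, List.length_nil]
      omega
    · simp

lemma pvWalk_append (layers ext : List (PySem.Dict Int (Int × Bool))) (j : Nat) (hj : j < layers.length) (v : Int) :
    pvWalk (layers ++ ext) j v = pvWalk layers j v := by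
  induction j generalizing v with
  | zero => simp [pvWalk, List.getElem?_append_left hj]
  | succ j ih =>
    simp only [pvWalk, List.getD, List.getElem?_append_left hj]
    split
    · rw [ih (by omega)]
    · rfl

lemma pvPad_eq_emb (k : Nat) (sv : Nat × List Int) (h : sv.1 + sv.2.length = k) :
    pvPadB k sv = pvEmb sv := by
  simp [pvPadB, pvEmb]; omega

lemma pvPad_succ (k : Nat) (sv : Nat × List Int) (h : sv.1 + sv.2.length ≤ k) :
    pvPadB k sv ++ [(none : Option Int)] = pvPadB (k + 1) sv := by
  have h' : k + 1 - sv.1 - sv.2.length = (k - sv.1 - sv.2.length) + 1 := by omega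
  simp [pvPadB, h', List.replicate_succ' (n := k - sv.1 - sv.2.length)]

lemma pvEmb_snoc (sv : Nat × List Int) (y : Int) :
    pvEmb (sv.1, sv.2 ++ [y]) = pvEmb sv ++ [some y] := by
  simp [pvEmb]

lemma pv_getD_concat {α : Type} (l : List α) (t d : α) : (l ++ [t]).getD l.length d = t := by
  simp [List.getD, List.getElem?_append_right (Nat.le_refl l.length)]

lemma pv_getD_append {α : Type} (l : List α) (t : List α) (n : Nat) (d : α) (h : n < l.length) :
    (l ++ t).getD n d = l.getD n d := by
  simp [List.getD, List.getElem?_append_left h]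

-- find? through a key-preserving map
lemma pv_find?_map {β V : Type} (g : Int × β → V) (l : List (Int × β)) (x : Int) :
    (l.map (fun p => (p.1, g p))).find? (fun p => p.1 == x) = (l.find? (fun p => p.1 == x)).map (fun p => (p.1, g p)) := by
  rw [List.find?_map]
  rfl

-- find? through a filter whose predicate only reads the key
lemma pv_find?_filter {β : Type} (l : List (Int × β)) (c : Int → Bool) (x : Int) :
    (l.filter (fun p => c p.1)).find? (fun p => p.1 == x)
      = if c x then l.find? (fun p => p.1 == x) else none := by
  induction l with
  | nil => simp
  | cons a l ih =>
    rw [List.filter_cons]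
    cases hax : (a.1 == x) with
    | true =>
      have hx : a.1 = x := by simpa using hax
      cases hca : c a.1 with
      | true => simp [hax, hx ▸ hca]
      | false => simp [hax, hx ▸ hca, ih]
    | false =>
      cases hca : c a.1 with
      | true => simp [List.find?_cons, hax, ih]
      | false => simp [hax, ih]

lemma pv_find?_mem {β : Type} (l : List (Int × β)) (x : Int) (hx : x ∈ l.map (·.1)) :
    ∃ b, l.find? (fun p => p.1 == x) = some (x, b) := by
  induction l with
  | nil => simp at hx
  | cons a l ih =>
    obtain ⟨a1, a2⟩ := a
    by_cases hax : a1 = x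
    · subst hax
      exact ⟨a2, by simp [List.find?_cons]⟩
    · have hx' : x ∈ l.map (·.1) := by
        simp only [List.map_cons, List.mem_cons] at hx
        rcases hx with h | h
        · exact absurd h.symm hax
        · exact h
      rcases ih hx' with ⟨b, hb⟩
      exact ⟨b, by simp [List.find?_cons, hax, hb]⟩

lemma pv_find?_not_mem {β : Type} (l : List (Int × β)) (x : Int) (hx : x ∉ l.map (·.1)) :
    l.find? (fun p => p.1 == x) = none := by
  apply List.find?_eq_none.mpr
  intro p hp
  simp only [beq_iff_eq]
  intro h
  exact hx (h ▸ List.mem_map_of_mem (f := fun p => p.1) hp)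

lemma pv_ofList_contains (l : List Int) (x : Int) : (PySem.Set.ofList l).contains x = l.contains x := by
  by_cases h : x ∈ l <;> simp [PySem.Set.contains, h, PySem.Set.mem_ofList]

lemma pv_add_contains (s : PySem.Set Int) (x y : Int) (hx : s.contains x = false) :
    (s.add x).contains y = (s.contains y || y == x) := by
  have hx' : x ∉ s := by simpa [PySem.Set.contains] using hx
  by_cases hy : y ∈ s <;> by_cases hyx : y = x <;>
    simp [PySem.Set.add, PySem.Set.contains, hx', hy, hyx]

-- old-side get? characterization
lemma pvRelO_get? {k : Nat} {layers : List (PySem.Dict Int (Int × Bool))} {dA : PySem.Dict Int (List (Option Int))}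
    {prevT : PySem.Dict Int (Int × Bool)} {cons : PySem.Set Int} (h : pvRelO k layers dA prevT cons) (x : Int) :
    dA.get? x = if x ∈ prevT.keys ∧ cons.contains x = false
      then some (pvEmb (pvWalk layers (k - 1) x)) else none := by
  unfold pvRelO at h
  simp only [PySem.Dict.get?, h, pv_find?_map]
  rw [pv_find?_filter prevT.items (fun y => !cons.contains y) x]
  by_cases hc : cons.contains x = false
  · rw [hc]
    simp only [Bool.not_false, if_true]
    by_cases hm : x ∈ prevT.keys
    · rcases pv_find?_mem prevT.items x hm with ⟨b, hb⟩
      rw [hb]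
      simp [hm, hc]
    · rw [pv_find?_not_mem prevT.items x hm]
      simp [hm]
  · have hc' : cons.contains x = true := by revert hc; cases cons.contains x <;> simp
    rw [hc']
    simp [hc']

-- popping x from old = adding x to consumed
lemma pvRelO_erase {k : Nat} {layers : List (PySem.Dict Int (Int × Bool))} {dA : PySem.Dict Int (List (Option Int))}
    {prevT : PySem.Dict Int (Int × Bool)} {cons : PySem.Set Int} (h : pvRelO k layers dA prevT cons)
    (x : Int) (hx : cons.contains x = false) :
    pvRelO k layers (dA.erase x) prevT (cons.add x) := by
  unfold pvRelO at h ⊢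
  simp only [PySem.Dict.erase, h, List.filter_map]
  congr 1
  rw [List.filter_filter]
  apply List.filter_congr
  intro p _
  simp only [Function.comp, pv_add_contains cons x p.1 hx, beq_iff_eq]
  cases hc : cons.contains p.1 <;> by_cases hp : p.1 = x <;> simp [hp]

-- inserting y into curr = inserting y into the table
lemma pvRelC_insert {k : Nat} {layers : List (PySem.Dict Int (Int × Bool))} {dA : PySem.Dict Int (List (Option Int))}
    {t : PySem.Dict Int (Int × Bool)} (h : pvRelC k layers dA t) (y : Int) (v : Int × Bool) :
    pvRelC k layers (dA.insert y (pvVal k layers (y, v))) (t.insert y v) := by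
  have hcont : dA.contains y = t.contains y := by
    unfold pvRelC at h
    simp only [PySem.Dict.contains, h, List.any_map]
    rfl
  unfold pvRelC at h ⊢
  simp only [PySem.Dict.insert, hcont, h]
  split
  · simp only [List.map_map]
    apply List.map_congr_left
    intro p _
    by_cases hk : p.1 = y <;> simp [hk, Function.comp]
  · simp

-- keys.filter bridged to items.filter
lemma pv_keys_filter_map {β : Type} {V : Type} (items : List (Int × β)) (c : Int → Bool) (g : Int → V) :
    ((items.map (·.1)).filter c).map g = (items.filter (fun p => c p.1)).map (fun p => g p.1) := by
  rw [List.filter_map, List.map_map]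
  rfl

-- the big inner-loop lockstep lemma
lemma pv_inner (k : Nat) (layers : List (PySem.Dict Int (Int × Bool))) (prevT : PySem.Dict Int (Int × Bool))
    (ps : List (Int × Int)) :
    ∀ (cA oA : PySem.Dict Int (List (Option Int))) (cons : PySem.Set Int) (t : PySem.Dict Int (Int × Bool)),
    pvRelC k layers cA t → pvRelO k layers oA prevT cons → t.keys.Nodup →
    (∀ p ∈ t.items, p.2.2 = true → p.2.1 ∈ prevT.keys) →
    pvRelC k layers (ps.foldl (pvStepInnerA k) (cA, oA)).1 (ps.foldl (pvStepInnerB (PySem.Set.ofList prevT.keys)) (cons, t)).2 ∧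
    pvRelO k layers (ps.foldl (pvStepInnerA k) (cA, oA)).2 prevT (ps.foldl (pvStepInnerB (PySem.Set.ofList prevT.keys)) (cons, t)).1 ∧
    (ps.foldl (pvStepInnerB (PySem.Set.ofList prevT.keys)) (cons, t)).2.keys.Nodup ∧
    (∀ p ∈ (ps.foldl (pvStepInnerB (PySem.Set.ofList prevT.keys)) (cons, t)).2.items, p.2.2 = true → p.2.1 ∈ prevT.keys) := by
  induction ps with
  | nil => intro cA oA cons t h1 h2 h3 h4; exact ⟨h1, h2, h3, h4⟩
  | cons xy rest ih =>
    intro cA oA cons t h1 h2 h3 h4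
    simp only [List.foldl_cons]
    have hget := pvRelO_get? h2 xy.1
    have hcontB : (PySem.Set.ofList prevT.keys).contains xy.1 = decide (xy.1 ∈ prevT.keys) := by
      rw [pv_ofList_contains]
      by_cases hm : xy.1 ∈ prevT.keys <;> simp [hm]
    by_cases hcase : xy.1 ∈ prevT.keys ∧ cons.contains xy.1 = false
    · -- the pair continues a chain of the previous layer
      have hA : pvStepInnerA k (cA, oA) xy
          = (cA.insert xy.2 (pvEmb (pvWalk layers (k - 1) xy.1) ++ [some xy.2]), oA.erase xy.1) := by
        simp only [pvStepInnerA, PySem.Dict.pop?, hget, if_pos hcase, Option.map_some]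
      have hc1 : (PySem.Set.ofList prevT.keys).contains xy.1 = true := by
        rw [hcontB]; simp [hcase.1]
      have hcont : ((PySem.Set.ofList prevT.keys).contains xy.1 && !(cons.contains xy.1)) = true := by
        rw [hc1, hcase.2]; rfl
      have hB : pvStepInnerB (PySem.Set.ofList prevT.keys) (cons, t) xy
          = (cons.add xy.1, t.insert xy.2 (xy.1, true)) := by
        simp only [pvStepInnerB, hcont]
        simp
      rw [hA, hB]
      apply ih
      · have := pvRelC_insert h1 xy.2 (xy.1, true)
        simpa [pvVal] using this
      · exact pvRelO_erase h2 xy.1 hcase.2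
      · exact PySem.Dict.nodup_keys_insert _ _ _ h3
      · intro p hp
        rcases (PySem.Dict.mem_items_insert _ _ _ _).mp hp with h' | h'
        · subst h'; exact fun _ => hcase.1
        · exact h4 p h'.1
    · -- the pair starts a fresh chain
      have hcont : ((PySem.Set.ofList prevT.keys).contains xy.1 && !(cons.contains xy.1)) = false := by
        rw [hcontB]
        by_cases hm : xy.1 ∈ prevT.keys
        · have hc : cons.contains xy.1 = true := by
            rcases Bool.eq_false_or_eq_true (cons.contains xy.1) with h | h
            · exact h
            · exact absurd ⟨hm, h⟩ hcase
          rw [hc]; simp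
        · simp [hm]
      have hA : pvStepInnerA k (cA, oA) xy
          = (cA.insert xy.2 ((List.replicate k (none : Option Int) ++ [some xy.1]) ++ [some xy.2]), oA) := by
        simp only [pvStepInnerA, PySem.Dict.pop?, hget, if_neg hcase, Option.map_none]
      have hB : pvStepInnerB (PySem.Set.ofList prevT.keys) (cons, t) xy
          = (cons, t.insert xy.2 (xy.1, false)) := by
        simp only [pvStepInnerB, hcont]
        simp
      rw [hA, hB]
      apply ih
      · have := pvRelC_insert h1 xy.2 (xy.1, false)
        simpa [pvVal, List.append_assoc] using this
      · exact h2
      · exact PySem.Dict.nodup_keys_insert _ _ _ h3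
      · intro p hp
        rcases (PySem.Dict.mem_items_insert _ _ _ _).mp hp with h' | h'
        · subst h'; simp
        · exact h4 p h'.1

lemma pv_getD_last {α : Type} (l : List α) (d : α) (h : l ≠ []) : l.getD (l.length - 1) d = l.getLastD d := by
  rw [List.getD, ← List.getLast?_eq_getElem?, List.getLastD_eq_getLast?]

-- a finished table entry's chain value is the embedded walk once the table is appended
lemma pv_val_eq_walk (k : Nat) (layers : List (PySem.Dict Int (Int × Bool))) (t : PySem.Dict Int (Int × Bool))
    (hl : layers.length = k) (hnt : t.keys.Nodup) (p : Int × (Int × Bool)) (hp : p ∈ t.items)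
    (hk0 : p.2.2 = true → 0 < k) :
    pvVal k layers p = pvEmb (pvWalk (layers ++ [t]) k p.1) := by
  have hgetD : (layers ++ [t]).getD k (PySem.Dict.mk []) = t := by
    rw [← hl]; exact pv_getD_concat layers t _
  have hpt : t.getD p.1 (0, false) = p.2 :=
    PySem.Dict.getD_of_mem_items t (by simpa using hp) hnt _
  cases hc : p.2.2 with
  | true =>
    obtain ⟨k', rfl⟩ : ∃ k', k = k' + 1 := ⟨k - 1, by have := hk0 hc; omega⟩
    simp only [pvWalk, hgetD, hpt, hc, if_true]
    have hw : pvWalk (layers ++ [t]) k' p.2.1 = pvWalk layers k' p.2.1 :=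
      pvWalk_append layers [t] k' (by omega) p.2.1
    rw [hw]
    have := pvEmb_snoc (pvWalk layers k' p.2.1) p.1
    simp only [pvVal, hc, if_true, Nat.add_sub_cancel]
    exact this.symm
  | false =>
    have hw : pvWalk (layers ++ [t]) k p.1 = (k, [p.2.1, p.1]) := by
      cases k with
      | zero => simp only [pvWalk, hgetD, hpt]
      | succ k'' => simp only [pvWalk, hgetD, hpt, hc, Bool.false_eq_true, if_false]
    rw [hw]
    simp [pvVal, hc, pvEmb]

lemma pv_flush_bound (layers : List (PySem.Dict Int (Int × Bool))) (flags : List (PySem.Set Int))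
    (sv : Nat × List Int) (h : sv ∈ pvFlushK layers flags) : sv.1 + sv.2.length ≤ flags.length := by
  unfold pvFlushK at h
  rcases List.mem_flatMap.mp h with ⟨i, hi, hmem⟩
  rcases List.mem_map.mp hmem with ⟨y, _, rfl⟩
  have := pvWalk_len layers i y
  have := List.mem_range.mp hi
  omega

lemma pv_flush_snoc (layers : List (PySem.Dict Int (Int × Bool))) (flags : List (PySem.Set Int))
    (t : PySem.Dict Int (Int × Bool)) (cn : PySem.Set Int)
    (hl : layers.length = flags.length) (hk : 0 < flags.length) :
    pvFlushK (layers ++ [t]) (flags ++ [cn])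
      = pvFlushK layers flags
        ++ ((layers.getD (flags.length - 1) (PySem.Dict.mk [])).keys.filter (fun y => !(cn.contains y))).map
            (pvWalk layers (flags.length - 1)) := by
  unfold pvFlushK
  have h1 : (flags ++ [cn]).length - 1 = flags.length := by simp
  rw [h1]
  have h2 : flags.length = (flags.length - 1) + 1 := by omega
  rw [h2, List.range_succ, List.flatMap_append]
  rw [← h2]
  congr 1
  · apply List.flatMap_congr
    intro i hi
    have hi' := List.mem_range.mp hi
    have e1 : (layers ++ [t]).getD i (PySem.Dict.mk []) = layers.getD i (PySem.Dict.mk []) :=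
      pv_getD_append layers [t] i _ (by omega)
    have e2 : (flags ++ [cn]).getD (i + 1) ([] : PySem.Set Int) = flags.getD (i + 1) ([] : PySem.Set Int) :=
      pv_getD_append flags [cn] (i + 1) _ (by omega)
    rw [e1, e2]
    apply List.map_congr_left
    intro y _
    exact pvWalk_append layers [t] i (by omega) y
  · simp only [List.flatMap_cons, List.flatMap_nil, List.append_nil]
    have e1 : (layers ++ [t]).getD (flags.length - 1) (PySem.Dict.mk []) = layers.getD (flags.length - 1) (PySem.Dict.mk []) :=
      pv_getD_append layers [t] _ _ (by omega)
    have e2 : (flags ++ [cn]).getD ((flags.length - 1) + 1) ([] : PySem.Set Int) = cn := by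
      rw [← h2]
      exact pv_getD_concat flags cn _
    rw [e1, e2]
    apply List.map_congr_left
    intro y _
    exact pvWalk_append layers [t] _ (by omega) y

-- the outer loops stay in lockstep
lemma pv_outer (ms : List (List (Int × Int))) :
    ∀ (k : Nat) (cA : PySem.Dict Int (List (Option Int))) (rA : List (List (Option Int)))
      (layers : List (PySem.Dict Int (Int × Bool))) (flags : List (PySem.Set Int)),
    layers.length = k → flags.length = k →
    (∀ t ∈ layers, (PySem.Dict.keys t).Nodup) →
    cA.items = (layers.getLastD (PySem.Dict.mk [])).items.map (fun p => (p.1, pvEmb (pvWalk layers (k - 1) p.1))) →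
    rA = (pvFlushK layers flags).map (pvPadB k) →
    (ms.foldl pvStepA (k, cA, rA)).1 = k + ms.length ∧
    (ms.foldl pvStepB (layers, flags, PySem.Set.ofList ((layers.getLastD (PySem.Dict.mk [])).keys))).1.length = k + ms.length ∧
    (ms.foldl pvStepB (layers, flags, PySem.Set.ofList ((layers.getLastD (PySem.Dict.mk [])).keys))).2.1.length = k + ms.length ∧
    (ms.foldl pvStepB (layers, flags, PySem.Set.ofList ((layers.getLastD (PySem.Dict.mk [])).keys))).2.2
      = PySem.Set.ofList (((ms.foldl pvStepB (layers, flags, PySem.Set.ofList ((layers.getLastD (PySem.Dict.mk [])).keys))).1.getLastD (PySem.Dict.mk [])).keys) ∧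
    (∀ t ∈ (ms.foldl pvStepB (layers, flags, PySem.Set.ofList ((layers.getLastD (PySem.Dict.mk [])).keys))).1, (PySem.Dict.keys t).Nodup) ∧
    (ms.foldl pvStepA (k, cA, rA)).2.1.items
      = ((ms.foldl pvStepB (layers, flags, PySem.Set.ofList ((layers.getLastD (PySem.Dict.mk [])).keys))).1.getLastD (PySem.Dict.mk [])).items.map
          (fun p => (p.1, pvEmb (pvWalk (ms.foldl pvStepB (layers, flags, PySem.Set.ofList ((layers.getLastD (PySem.Dict.mk [])).keys))).1 (k + ms.length - 1) p.1))) ∧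
    (ms.foldl pvStepA (k, cA, rA)).2.2
      = (pvFlushK (ms.foldl pvStepB (layers, flags, PySem.Set.ofList ((layers.getLastD (PySem.Dict.mk [])).keys))).1
          (ms.foldl pvStepB (layers, flags, PySem.Set.ofList ((layers.getLastD (PySem.Dict.mk [])).keys))).2.1).map (pvPadB (k + ms.length)) := by
  induction ms with
  | nil =>
    intro k cA rA layers flags hl hf hnd hcurr hres
    refine ⟨rfl, by simpa using hl, by simpa using hf, rfl, hnd, by simpa using hcurr, by simpa using hres⟩
  | cons m rest ih =>
    intro k cA rA layers flags hl hf hnd hcurr hres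
    simp only [List.foldl_cons]
    obtain ⟨i1, i2, i3, i4⟩ := pv_inner k layers (layers.getLastD (PySem.Dict.mk [])) m
      (PySem.Dict.mk []) cA ([] : PySem.Set Int) (PySem.Dict.mk [])
      (by unfold pvRelC; simp)
      (by unfold pvRelO
          rw [List.filter_eq_self.mpr (fun p _ => by rfl)]
          exact hcurr)
      (by simp)
      (by intro p hp; simp at hp)
    set tb := (m.foldl (pvStepInnerB (PySem.Set.ofList ((layers.getLastD (PySem.Dict.mk [])).keys))) (([] : PySem.Set Int), PySem.Dict.mk [])).2 with htb
    set cn := (m.foldl (pvStepInnerB (PySem.Set.ofList ((layers.getLastD (PySem.Dict.mk [])).keys))) (([] : PySem.Set Int), PySem.Dict.mk [])).1 with hcn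
    set curA := (m.foldl (pvStepInnerA k) (PySem.Dict.mk [], cA)).1 with hcurA
    set oldA := (m.foldl (pvStepInnerA k) (PySem.Dict.mk [], cA)).2 with holdA
    have hstepA : pvStepA (k, cA, rA) m
        = (k + 1, curA, rA.map (fun c => c ++ [(none : Option Int)]) ++ oldA.values) := rfl
    have hstepB : pvStepB (layers, flags, PySem.Set.ofList ((layers.getLastD (PySem.Dict.mk [])).keys)) m
        = (layers ++ [tb], flags ++ [cn], PySem.Set.ofList tb.keys) := rfl
    rw [hstepA, hstepB]
    have hnd' : ∀ t' ∈ layers ++ [tb], (PySem.Dict.keys t').Nodup := by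
      intro t' ht'
      rcases List.mem_append.mp ht' with h | h
      · exact hnd _ h
      · rw [List.mem_singleton.mp h]; exact i3
    have hcurr' : curA.items = ((layers ++ [tb]).getLastD (PySem.Dict.mk [])).items.map
        (fun p => (p.1, pvEmb (pvWalk (layers ++ [tb]) (k + 1 - 1) p.1))) := by
      rw [List.getLastD_concat]
      unfold pvRelC at i1
      rw [i1]
      apply List.map_congr_left
      intro p hp
      have hk0 : p.2.2 = true → 0 < k := by
        intro hc
        have hmem := i4 p hp hc
        by_cases hzero : k = 0
        · exfalso
          have : layers = [] := List.eq_nil_of_length_eq_zero (hzero ▸ hl)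
          rw [this] at hmem
          simp [PySem.Dict.keys] at hmem
        · omega
      rw [pv_val_eq_walk k layers tb hl i3 p hp hk0]
      simp
    have hres' : rA.map (fun c => c ++ [(none : Option Int)]) ++ oldA.values
        = (pvFlushK (layers ++ [tb]) (flags ++ [cn])).map (pvPadB (k + 1)) := by
      by_cases hzero : k = 0
      · have hle : layers = [] := List.eq_nil_of_length_eq_zero (hzero ▸ hl)
        have hfe : flags = [] := List.eq_nil_of_length_eq_zero (hzero ▸ hf)
        subst hle; subst hfe
        have hrA : rA = [] := by simpa [pvFlushK] using hres
        have hov : oldA.values = [] := by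
          unfold pvRelO at i2
          simp only [PySem.Dict.values, i2]
          simp
        rw [hrA, hov]
        simp [pvFlushK]
      · have hkpos : 0 < flags.length := by omega
        rw [pv_flush_snoc layers flags tb cn (by omega) hkpos, List.map_append]
        congr 1
        · rw [hres, List.map_map]
          apply List.map_congr_left
          intro sv hsv
          have hb := pv_flush_bound layers flags sv hsv
          have hp := pvPad_succ k sv (by omega)
          simpa using hp
        · have egetD : layers.getD (flags.length - 1) (PySem.Dict.mk []) = layers.getLastD (PySem.Dict.mk []) := by
            have : flags.length - 1 = layers.length - 1 := by omega
            rw [this]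
            exact pv_getD_last layers _ (by intro h; rw [h] at hl; simp at hl; omega)
          rw [egetD, List.map_map]
          simp only [Function.comp_def, PySem.Dict.keys]
          rw [pv_keys_filter_map ((layers.getLastD (PySem.Dict.mk [])).items) (fun y => !(cn.contains y))
              (fun y => pvPadB (k + 1) (pvWalk layers (flags.length - 1) y))]
          unfold pvRelO at i2
          simp only [PySem.Dict.values, i2, List.map_map]
          apply List.map_congr_left
          intro p hp
          have hlen := pvWalk_len layers (k - 1) p.1
          have hfk : flags.length - 1 = k - 1 := by omega
          simp only [Function.comp]
          rw [hfk, pvPad_eq_emb (k + 1) _ (by omega)]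
    obtain ⟨c1, c2, c3, c4, c5, c6, c7⟩ := ih (k + 1) curA
      (rA.map (fun c => c ++ [(none : Option Int)]) ++ oldA.values)
      (layers ++ [tb]) (flags ++ [cn])
      (by simp [hl]) (by simp [hf]) hnd' (by rw [List.getLastD_concat] at hcurr' ⊢; exact hcurr') hres'
    simp only [List.getLastD_concat] at c2 c3 c4 c5 c6 c7
    have hk1 : k + 1 + rest.length = k + (m :: rest).length := by simp; omega
    rw [hk1] at c1 c2 c3 c6 c7
    exact ⟨c1, c2, c3, c4, c5, c6, c7⟩

-- dropping the trailing (empty) sentinel table does not change the flushed chains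
lemma pv_flush_drop (layers : List (PySem.Dict Int (Int × Bool))) (t : PySem.Dict Int (Int × Bool))
    (flags : List (PySem.Set Int)) (hF : flags.length - 1 ≤ layers.length) :
    pvFlushK (layers ++ [t]) flags = pvFlushK layers flags := by
  unfold pvFlushK
  apply List.flatMap_congr
  intro i hi
  have hi' := List.mem_range.mp hi
  rw [pv_getD_append layers [t] i _ (by omega)]
  apply List.map_congr_left
  intro y _
  exact pvWalk_append layers [t] i (by omega) y

-- ===== VERDICT (by name: the statement is the Claim_ definition above) =====
theorem combine_matches_spec : Claim_equal_combine_matches := by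
  intro ms _
  unfold Spec_combine_matches
  simp only [combine_matches, combine_matches_alt]
  have e0 : PySem.Set.ofList ((List.getLastD ([] : List (PySem.Dict Int (Int × Bool))) (PySem.Dict.mk [])).keys) = ([] : PySem.Set Int) := rfl
  obtain ⟨c1, c2, c3, c4, c5, c6, c7⟩ := pv_outer (ms ++ [[]]) 0 (PySem.Dict.mk []) [] [] []
    rfl rfl (by intro t ht; simp at ht) (by simp) (by simp [pvFlushK])
  rw [e0] at c2 c3 c7
  set FN := ms.foldl pvStepB (([] : List (PySem.Dict Int (Int × Bool))), ([] : List (PySem.Set Int)), ([] : PySem.Set Int)) with hFN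
  have hsplit1 : (List.foldl pvStepB (([] : List (PySem.Dict Int (Int × Bool))), ([] : List (PySem.Set Int)), ([] : PySem.Set Int)) (ms ++ [[]])).1
      = FN.1 ++ [PySem.Dict.mk []] := by
    rw [List.foldl_append]; rfl
  have hsplit2 : (List.foldl pvStepB (([] : List (PySem.Dict Int (Int × Bool))), ([] : List (PySem.Set Int)), ([] : PySem.Set Int)) (ms ++ [[]])).2.1
      = FN.2.1 ++ [([] : PySem.Set Int)] := by
    rw [List.foldl_append]; rfl
  rw [hsplit1, hsplit2] at c7
  rw [hsplit2] at c3
  rw [hsplit1] at c2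
  have hmslen : 0 + (ms ++ [[]]).length = ms.length + 1 := by simp
  rw [hmslen] at c7
  have hlenF : FN.2.1.length = ms.length := by
    simp at c3; omega
  have hlenL : FN.1.length = ms.length := by
    simp at c2; omega
  rw [c7]
  rw [pv_flush_drop FN.1 (PySem.Dict.mk []) (FN.2.1 ++ [([] : PySem.Set Int)]) (by simp [hlenF, hlenL])]
  -- the two appending loops of B are the flush flatMap
  have hinner : ∀ (i : Nat) (acc : List (List (Option Int))),
      ((FN.1.getD i (PySem.Dict.mk [])).keys.foldl (fun acc2 y =>
        if !(((FN.2.1 ++ [([] : PySem.Set Int)]).getD (i + 1) ([] : PySem.Set Int)).contains y) then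
          acc2 ++ [pvPadB (ms.length + 1) (pvWalk FN.1 i y)]
        else acc2) acc)
      = acc ++ (((FN.1.getD i (PySem.Dict.mk [])).keys.filter (fun y =>
          !(((FN.2.1 ++ [([] : PySem.Set Int)]).getD (i + 1) ([] : PySem.Set Int)).contains y))).map
            (fun y => pvPadB (ms.length + 1) (pvWalk FN.1 i y))) := by
    intro i acc
    exact PySem.List.foldl_append_if _ _ _ _
  have hfun : (fun (acc : List (List (Option Int))) (i : Nat) =>
      (FN.1.getD i (PySem.Dict.mk [])).keys.foldl (fun acc2 y =>
        if !(((FN.2.1 ++ [([] : PySem.Set Int)]).getD (i + 1) ([] : PySem.Set Int)).contains y) then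
          acc2 ++ [pvPadB (ms.length + 1) (pvWalk FN.1 i y)]
        else acc2) acc)
      = (fun acc i => acc ++ (((FN.1.getD i (PySem.Dict.mk [])).keys.filter (fun y =>
          !(((FN.2.1 ++ [([] : PySem.Set Int)]).getD (i + 1) ([] : PySem.Set Int)).contains y))).map
            (fun y => pvPadB (ms.length + 1) (pvWalk FN.1 i y)))) := by
    funext acc i
    exact hinner i acc
  rw [hfun, PySem.List.foldl_append_eq_flatMap, List.nil_append]
  unfold pvFlushK
  have hlen1 : (FN.2.1 ++ [([] : PySem.Set Int)]).length - 1 = ms.length := by simp [hlenF]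
  rw [hlen1, List.map_flatMap]
  apply List.flatMap_congr
  intro i _
  rw [List.map_map]
  rfl
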